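-- pv_equiv track=rewrite | github.com/manavdahra/interview-prep | split_array_equal_sum.py | splitArrayEqual
-- ===== SOURCE A (Python) =====
-- from typing import List
--
-- def splitArrayEqual(nums: List[int]):
--     if len(nums) < 7: return False
--
--     prefix = []
--     tot = 0
--     for num in nums:
--         tot += num
--         prefix.append(tot)
--
--     for j in range(3, len(nums)-3):
--         sumSet = set()
--         for i in range(1, j-1):
--             if prefix[j-1] - prefix[i] == prefix[i-1]:
--                 sumSet.add(prefix[i-1])
--
--         for k in range(j+2, len(nums)-1):
--             if prefix[k-1] - prefix[j] == tot - prefix[k] and tot - prefix[k] in sumSet: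
--                 return True
--
--     return False
-- ===== SOURCE B (Python) =====
-- from typing import List
--
-- def splitArrayEqual(nums: List[int]):
--     n = len(nums)
--     if n < 7:
--         return False
--     for i in range(1, n - 5):
--         s1 = sum(nums[:i])
--         for j in range(i + 2, n - 3):
--             if s1 != sum(nums[i + 1:j]):
--                 continue
--             for k in range(j + 2, n - 1):
--                 if sum(nums[j + 1:k]) == s1 and sum(nums[k + 1:]) == s1:
--                     return True
--     return False
-- ===== Notes on version B (the rewrite author's own statement) =====
-- stated objective: simpler
-- what changed: Dropped A's prefix-sum array and its per-j hash-set of candidate first-cut sums entirely: B loops directly over the cut triples i, j, k (first cut outermost) and checks the four-segment equality by summing list slices, returning True on the first matching triple.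
import Mathlib
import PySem

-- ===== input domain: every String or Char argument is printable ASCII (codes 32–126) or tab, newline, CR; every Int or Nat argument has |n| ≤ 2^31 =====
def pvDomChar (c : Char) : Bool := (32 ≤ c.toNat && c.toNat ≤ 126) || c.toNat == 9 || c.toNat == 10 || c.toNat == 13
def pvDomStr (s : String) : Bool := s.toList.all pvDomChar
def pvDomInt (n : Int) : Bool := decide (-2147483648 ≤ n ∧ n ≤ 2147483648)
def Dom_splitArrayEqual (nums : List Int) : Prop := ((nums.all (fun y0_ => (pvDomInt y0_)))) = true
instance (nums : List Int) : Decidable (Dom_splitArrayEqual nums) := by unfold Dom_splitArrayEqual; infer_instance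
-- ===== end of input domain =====

-- B drops A's prefix array and per-j hash-set entirely: it loops over the cut triples
-- i, j, k directly (first cut outermost) and compares the four segment sums computed
-- straight from slices of the list — simpler, no maintained set, no prefix array.

-- ===== PORT A =====
def splitArrayEqual (nums : List Int) : Bool :=
  if (nums.length : Int) < 7 then false
  else
    let st := nums.foldl (fun (st : Int × List Int) num =>
      (st.1 + num, st.2 ++ [st.1 + num])) (0, [])
    let tot := st.1
    let pre := st.2
    (PySem.List.pyRange 3 ((nums.length : Int) - 3) 1).any (fun j =>
      let sumSet : PySem.Set Int :=
        (PySem.List.pyRange 1 (j - 1) 1).foldl (fun s i =>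
          if PySem.List.pyGetD pre (j - 1) 0 - PySem.List.pyGetD pre i 0
              = PySem.List.pyGetD pre (i - 1) 0
          then PySem.Set.add s (PySem.List.pyGetD pre (i - 1) 0) else s) PySem.Set.empty
      (PySem.List.pyRange (j + 2) ((nums.length : Int) - 1) 1).any (fun k =>
        decide (PySem.List.pyGetD pre (k - 1) 0 - PySem.List.pyGetD pre j 0
                = tot - PySem.List.pyGetD pre k 0)
        && PySem.Set.contains sumSet (tot - PySem.List.pyGetD pre k 0)))

-- ===== PORT B =====
def splitArrayEqual_alt (nums : List Int) : Bool :=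
  let n : Int := nums.length
  if n < 7 then false
  else
    (PySem.List.pyRange 1 (n - 5) 1).any (fun i =>
      let s1 := (PySem.List.slice nums (some 0) (some i)).sum
      (PySem.List.pyRange (i + 2) (n - 3) 1).any (fun j =>
        decide (s1 = (PySem.List.slice nums (some (i + 1)) (some j)).sum)
        && (PySem.List.pyRange (j + 2) (n - 1) 1).any (fun k =>
          decide ((PySem.List.slice nums (some (j + 1)) (some k)).sum = s1)
          && decide ((PySem.List.slice nums (some (k + 1)) none).sum = s1))))

-- ===== PRECONDITION & SPEC =====
def Spec_splitArrayEqual (nums : List Int) (out : Bool) : Prop := out = splitArrayEqual_alt nums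
instance (nums : List Int) (out : Bool) : Decidable (Spec_splitArrayEqual nums out) := by unfold Spec_splitArrayEqual; infer_instance

-- ===== CLAIM (what is proved, stated in full; the proofs are below) =====
def Claim_equal_splitArrayEqual : Prop := ∀ (nums : List Int), Dom_splitArrayEqual nums → Spec_splitArrayEqual nums (splitArrayEqual nums)

-- ===== LEMMAS AND PROOFS =====

-- prefix sums of the first m elements (Int index, clamped through toNat)
def pvPP (nums : List Int) (m : Int) : Int := (nums.take m.toNat).sum

-- A's fold builds total and the list of prefix sums
theorem pvPrefixFold (l : List Int) (c : Int) (acc : List Int) :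
    l.foldl (fun (st : Int × List Int) num => (st.1 + num, st.2 ++ [st.1 + num])) (c, acc)
      = (c + l.sum, acc ++ (List.range l.length).map (fun t => c + (l.take (t + 1)).sum)) := by
  induction l generalizing c acc with
  | nil => simp
  | cons a t ih =>
    simp only [List.foldl_cons, ih, List.sum_cons, List.length_cons,
      List.range_succ_eq_map, List.map_cons, List.map_map]
    refine congrArg₂ Prod.mk (by ring) ?_
    rw [List.append_assoc]
    congr 1
    simp only [List.singleton_append, List.take_succ_cons, List.take_zero,
      List.sum_cons, List.sum_nil]
    congr 1
    · ring
    · apply List.map_congr_left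
      intro x _
      simp only [Function.comp_apply, Nat.succ_eq_add_one]
      ring

-- the prefix list indexed at t (0 ≤ t < n) is the sum of the first t+1 elements
theorem pvPreGet (nums : List Int) (t : Int) (h0 : 0 ≤ t) (h1 : t < (nums.length : Int)) :
    PySem.List.pyGetD ((List.range nums.length).map (fun t => (nums.take (t + 1)).sum)) t 0
      = pvPP nums (t + 1) := by
  rw [PySem.List.pyGetD_eq_getElem _ _ h0 (by simpa using h1)]
  rw [List.getElem_map, List.getElem_range]
  unfold pvPP
  congr 2
  omega

-- sum of a slice in terms of prefix sums
theorem pvSliceSum (nums : List Int) (a b : Int) (h0 : 0 ≤ a) (hab : a ≤ b) :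
    (PySem.List.slice nums (some a) (some b)).sum = pvPP nums b - pvPP nums a := by
  rw [PySem.List.slice_toNat nums h0 (le_trans h0 hab)]
  unfold pvPP
  have h2 : (nums.take b.toNat).sum
      = (nums.take a.toNat).sum + ((nums.drop a.toNat).take (b.toNat - a.toNat)).sum := by
    conv_lhs => rw [show b.toNat = a.toNat + (b.toNat - a.toNat) from by omega]
    rw [List.take_add, List.sum_append]
  omega

-- sum of a tail slice
theorem pvTailSum (nums : List Int) (a : Int) (h0 : 0 ≤ a) :
    (PySem.List.slice nums (some a) none).sum = nums.sum - pvPP nums a := by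
  rw [PySem.List.slice_from nums h0]
  unfold pvPP
  have := List.sum_take_add_sum_drop nums a.toNat
  omega

-- membership in A's conditionally-built set
theorem pvMemFoldlAddIf (I : List Int) (c : Int → Prop) [DecidablePred c] (w : Int → Int)
    (s0 : PySem.Set Int) (x : Int) :
    (x ∈ I.foldl (fun s i => if c i then PySem.Set.add s (w i) else s) s0)
      ↔ x ∈ s0 ∨ ∃ i ∈ I, c i ∧ x = w i := by
  induction I generalizing s0 with
  | nil => simp
  | cons a t ih =>
    by_cases h : c a
    · simp only [List.foldl_cons, if_pos h, ih, PySem.Set.mem_add, List.mem_cons]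
      constructor
      · rintro ((h0 | hx) | ⟨i, hi, hci, hx⟩)
        · exact Or.inl h0
        · exact Or.inr ⟨a, Or.inl rfl, h, hx⟩
        · exact Or.inr ⟨i, Or.inr hi, hci, hx⟩
      · rintro (h0 | ⟨i, (rfl | hi), hci, hx⟩)
        · exact Or.inl (Or.inl h0)
        · exact Or.inl (Or.inr hx)
        · exact Or.inr ⟨i, hi, hci, hx⟩
    · simp only [List.foldl_cons, if_neg h, ih, List.mem_cons]
      constructor
      · rintro (h0 | ⟨i, hi, hci, hx⟩)
        · exact Or.inl h0
        · exact Or.inr ⟨i, Or.inr hi, hci, hx⟩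
      · rintro (h0 | ⟨i, (rfl | hi), hci, hx⟩)
        · exact Or.inl h0
        · exact absurd hci h
        · exact Or.inr ⟨i, hi, hci, hx⟩

-- the common existential both ports are proved equal to (when 7 ≤ n)
def pvCond (nums : List Int) : Prop :=
  ∃ i j k : Int, 1 ≤ i ∧ i + 2 ≤ j ∧ j < (nums.length : Int) - 3 ∧
    j + 2 ≤ k ∧ k < (nums.length : Int) - 1 ∧
    pvPP nums i = pvPP nums j - pvPP nums (i + 1) ∧
    pvPP nums k - pvPP nums (j + 1) = pvPP nums i ∧
    nums.sum - pvPP nums (k + 1) = pvPP nums i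

theorem pvA_iff (nums : List Int) (h7 : ¬ (nums.length : Int) < 7) :
    splitArrayEqual nums = true ↔ pvCond nums := by
  unfold splitArrayEqual
  rw [if_neg h7]
  simp only [pvPrefixFold, List.nil_append, zero_add, List.any_eq_true,
    Bool.and_eq_true, decide_eq_true_eq, PySem.Set.contains_iff, pvMemFoldlAddIf,
    PySem.List.mem_pyRange_one]
  constructor
  · rintro ⟨j, ⟨hj1, hj2⟩, k, ⟨hk1, hk2⟩, hc2, (hemp | ⟨i, ⟨hi1, hi2⟩, hc1, hval⟩)⟩
    · exact absurd hemp (by simp [PySem.Set.empty])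
    · rw [pvPreGet nums (j - 1) (by omega) (by omega),
        pvPreGet nums i (by omega) (by omega),
        pvPreGet nums (i - 1) (by omega) (by omega),
        show (j : Int) - 1 + 1 = j from by ring,
        show (i : Int) - 1 + 1 = i from by ring] at hc1
      rw [pvPreGet nums (k - 1) (by omega) (by omega),
        pvPreGet nums j (by omega) (by omega),
        pvPreGet nums k (by omega) (by omega),
        show (k : Int) - 1 + 1 = k from by ring] at hc2
      rw [pvPreGet nums k (by omega) (by omega),
        pvPreGet nums (i - 1) (by omega) (by omega),
        show (i : Int) - 1 + 1 = i from by ring] at hval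
      exact ⟨i, j, k, hi1, by omega, hj2, hk1, hk2, hc1.symm, hc2.trans hval, hval⟩
  · rintro ⟨i, j, k, hi1, hij, hj2, hk1, hk2, c1, c2, c3⟩
    refine ⟨j, ⟨by omega, hj2⟩, k, ⟨hk1, hk2⟩, ?_, Or.inr ⟨i, ⟨hi1, by omega⟩, ?_, ?_⟩⟩
    · rw [pvPreGet nums (k - 1) (by omega) (by omega),
        pvPreGet nums j (by omega) (by omega),
        pvPreGet nums k (by omega) (by omega),
        show (k : Int) - 1 + 1 = k from by ring]
      omega
    · rw [pvPreGet nums (j - 1) (by omega) (by omega),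
        pvPreGet nums i (by omega) (by omega),
        pvPreGet nums (i - 1) (by omega) (by omega),
        show (j : Int) - 1 + 1 = j from by ring,
        show (i : Int) - 1 + 1 = i from by ring]
      omega
    · rw [pvPreGet nums k (by omega) (by omega),
        pvPreGet nums (i - 1) (by omega) (by omega),
        show (i : Int) - 1 + 1 = i from by ring]
      omega

theorem pvB_iff (nums : List Int) (h7 : ¬ (nums.length : Int) < 7) :
    splitArrayEqual_alt nums = true ↔ pvCond nums := by
  have hPP0 : pvPP nums 0 = 0 := by simp [pvPP]
  unfold splitArrayEqual_alt
  simp only [if_neg h7, List.any_eq_true, Bool.and_eq_true, decide_eq_true_eq,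
    PySem.List.mem_pyRange_one]
  constructor
  · rintro ⟨i, ⟨hi1, hi2⟩, j, ⟨hj1, hj2⟩, b1, k, ⟨hk1, hk2⟩, b2, b3⟩
    rw [pvSliceSum nums 0 i le_rfl (by omega),
      pvSliceSum nums (i + 1) j (by omega) (by omega), hPP0] at b1
    rw [pvSliceSum nums (j + 1) k (by omega) (by omega),
      pvSliceSum nums 0 i le_rfl (by omega), hPP0] at b2
    rw [pvTailSum nums (k + 1) (by omega),
      pvSliceSum nums 0 i le_rfl (by omega), hPP0] at b3
    exact ⟨i, j, k, hi1, hj1, hj2, hk1, hk2, by omega, by omega, by omega⟩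
  · rintro ⟨i, j, k, hi1, hij, hj2, hk1, hk2, c1, c2, c3⟩
    refine ⟨i, ⟨hi1, by omega⟩, j, ⟨hij, hj2⟩, ?_, k, ⟨hk1, hk2⟩, ?_, ?_⟩
    · rw [pvSliceSum nums 0 i le_rfl (by omega),
        pvSliceSum nums (i + 1) j (by omega) (by omega), hPP0]
      omega
    · rw [pvSliceSum nums (j + 1) k (by omega) (by omega),
        pvSliceSum nums 0 i le_rfl (by omega), hPP0]
      omega
    · rw [pvTailSum nums (k + 1) (by omega),
        pvSliceSum nums 0 i le_rfl (by omega), hPP0]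
      omega

-- ===== VERDICT (by name: the statement is the Claim_ definition above) =====
theorem splitArrayEqual_spec : Claim_equal_splitArrayEqual := by
  intro nums _
  unfold Spec_splitArrayEqual
  by_cases h : (nums.length : Int) < 7
  · simp [splitArrayEqual, splitArrayEqual_alt, h]
  · apply Bool.eq_iff_iff.mpr
    rw [pvA_iff nums h, pvB_iff nums h]
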